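-- pv_equiv track=rewrite | github.com/zsh-sage/reclaim | backend/engine/tools/change_detector.py | _compute_risk_level
-- ===== SOURCE A (Python) =====
-- def _compute_risk_level(changes: dict) -> str:
--     if not changes:
--         return "NONE"
--     if any(c["severity"] == "HIGH" for c in changes.values()):
--         return "HIGH"
--     if any(c["severity"] == "MEDIUM" for c in changes.values()):
--         return "MEDIUM"
--     return "LOW"
-- ===== SOURCE B (Python) =====
-- def _compute_risk_level(changes: dict) -> str:
--     # One-pass scan: return HIGH immediately, remember whether a MEDIUM was seen.
--     if not changes:
--         return "NONE"
--     saw_medium = False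
--     for c in changes.values():
--         sev = c["severity"]
--         if sev == "HIGH":
--             return "HIGH"
--         if sev == "MEDIUM":
--             saw_medium = True
--     return "MEDIUM" if saw_medium else "LOW"
-- ===== Notes on version B (the rewrite author's own statement) =====
-- stated objective: alternative
-- what changed: Replaces A's two separate any(...) scans over changes.values() with a single pass that returns HIGH immediately and tracks a saw_medium flag.
import Mathlib
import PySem

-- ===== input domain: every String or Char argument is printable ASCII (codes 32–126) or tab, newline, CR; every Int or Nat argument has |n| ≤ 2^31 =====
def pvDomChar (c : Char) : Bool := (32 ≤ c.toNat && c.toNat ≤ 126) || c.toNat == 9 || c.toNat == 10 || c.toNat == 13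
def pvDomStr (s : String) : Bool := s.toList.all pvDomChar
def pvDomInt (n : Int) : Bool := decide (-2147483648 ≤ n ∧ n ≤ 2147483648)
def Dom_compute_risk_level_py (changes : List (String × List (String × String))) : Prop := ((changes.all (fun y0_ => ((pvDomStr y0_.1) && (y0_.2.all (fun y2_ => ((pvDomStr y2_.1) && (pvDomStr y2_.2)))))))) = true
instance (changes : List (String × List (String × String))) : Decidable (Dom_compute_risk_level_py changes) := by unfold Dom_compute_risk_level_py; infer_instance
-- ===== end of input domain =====

-- B replaces A's two separate any(...) scans with a single flag-tracking pass (alternative decomposition).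


-- ===== PORT A =====
-- c["severity"]: exact on Pre_ (the key is present); Pre_ excludes the KeyError cases.
def pvSeverity (c : List (String × String)) : String :=
  (PySem.Dict.get? (PySem.Dict.ofList c) "severity").getD ""

def compute_risk_level_py (changes : List (String × List (String × String))) : String :=
  if changes = [] then "NONE"
  else if (changes.map Prod.snd).any (fun c => pvSeverity c == "HIGH") then "HIGH"
  else if (changes.map Prod.snd).any (fun c => pvSeverity c == "MEDIUM") then "MEDIUM"
  else "LOW"

-- ===== PORT B =====
-- one pass: return "HIGH" at once, carry a saw_medium flag
def computeRiskGo (vals : List (List (String × String))) (sawMedium : Bool) : String :=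
  match vals with
  | [] => if sawMedium then "MEDIUM" else "LOW"
  | c :: rest =>
      let sev := pvSeverity c
      if sev == "HIGH" then "HIGH"
      else computeRiskGo rest (sawMedium || sev == "MEDIUM")

def compute_risk_level_py_alt (changes : List (String × List (String × String))) : String :=
  if changes = [] then "NONE"
  else computeRiskGo (changes.map Prod.snd) false

-- ===== PRECONDITION & SPEC =====
-- Pre_ excludes exactly the inputs on which A raises KeyError: some value dict lacks the
-- "severity" key and no value with severity "HIGH" (whose prefix all have the key) precedes it.
def Pre_compute_risk_level_py (changes : List (String × List (String × String))) : Prop :=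
  (∀ p ∈ changes, (PySem.Dict.get? (PySem.Dict.ofList p.2) "severity").isSome = true) ∨
  (∃ i, ∃ _ : i < changes.length,
    (∀ p ∈ changes.take i, (PySem.Dict.get? (PySem.Dict.ofList p.2) "severity").isSome = true) ∧
    pvSeverity (changes[i]!).2 = "HIGH")
instance (changes : List (String × List (String × String))) : Decidable (Pre_compute_risk_level_py changes) := by unfold Pre_compute_risk_level_py; infer_instance

def pvWitness_compute_risk_level_py : (List (String × List (String × String))) :=
  [("a", [("severity", "MEDIUM")]), ("b", [("severity", "LOW")])]

def Spec_compute_risk_level_py (changes : List (String × List (String × String))) (out : String) : Prop := out = compute_risk_level_py_alt changes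
instance (changes : List (String × List (String × String))) (out : String) : Decidable (Spec_compute_risk_level_py changes out) := by unfold Spec_compute_risk_level_py; infer_instance

-- ===== CLAIM (what is proved, stated in full; the proofs are below) =====
def Claim_equal_compute_risk_level_py : Prop := ∀ (changes : List (String × List (String × String))), Dom_compute_risk_level_py changes → Pre_compute_risk_level_py changes → Spec_compute_risk_level_py changes (compute_risk_level_py changes)

-- ===== LEMMAS AND PROOFS =====

-- the one-pass loop computes the same value as the two any-scans
lemma computeRiskGo_eq (vals : List (List (String × String))) (flag : Bool) :
    computeRiskGo vals flag =
      (if vals.any (fun c => pvSeverity c == "HIGH") then "HIGH"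
       else if flag || vals.any (fun c => pvSeverity c == "MEDIUM") then "MEDIUM"
       else "LOW") := by
  induction vals generalizing flag with
  | nil => simp [computeRiskGo]
  | cons c rest ih =>
      simp only [computeRiskGo, List.any_cons]
      by_cases hH : pvSeverity c == "HIGH"
      · simp [hH]
      · rw [ih]
        by_cases hM : pvSeverity c == "MEDIUM" <;> simp [hH, hM]

-- ===== VERDICT (by name: the statement is the Claim_ definition above) =====
theorem compute_risk_level_py_spec : Claim_equal_compute_risk_level_py := by
  intro changes _ _
  unfold Spec_compute_risk_level_py compute_risk_level_py compute_risk_level_py_alt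
  by_cases h : changes = []
  · simp [h]
  · rw [if_neg h, if_neg h, computeRiskGo_eq, Bool.false_or]
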